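-- pv_equiv track=rewrite | github.com/neelneelpurk/hackerrank-orchestrate-may26 | code/tools.py | _diversify_by_source
-- ===== SOURCE A (Python) =====
-- def _diversify_by_source(hits: list[dict], max_per_source: int) -> list[dict]:
--     """Cap how many chunks from the same source_path appear in the candidate pool.
--
--     Vector search routinely returns 4–8 adjacent chunks from one large article
--     because they all embed similarly. Capping per-source forces the reranker to
--     consider chunks from *other* docs that might be more relevant.
--     """
--     if max_per_source <= 0:
--         return hits
--     seen: dict[str, int] = {}
--     out: list[dict] = []
--     for h in hits:
--         sp = (h.get("metadata") or {}).get("source_path", "")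
--         seen[sp] = seen.get(sp, 0) + 1
--         if seen[sp] <= max_per_source:
--             out.append(h)
--     return out
-- ===== SOURCE B (Python) =====
-- def _diversify_by_source(hits: list[dict], max_per_source: int) -> list[dict]:
--     """Cap how many chunks from the same source_path appear in the candidate pool.
--
--     Staged formulation: group hits into per-source buckets (carrying original
--     indices), slice each bucket to the cap, then merge the picks back into
--     input order by sorting on the carried index.
--     """
--     if max_per_source <= 0:
--         return hits
--     buckets: dict[str, list] = {}
--     for i, h in enumerate(hits):
--         sp = (h.get("metadata") or {}).get("source_path", "")
--         buckets.setdefault(sp, []).append((i, h))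
--     picked = []
--     for items in buckets.values():
--         picked.extend(items[:max_per_source])
--     picked.sort(key=lambda p: p[0])
--     return [h for _, h in picked]
-- ===== Notes on version B (the rewrite author's own statement) =====
-- stated objective: alternative
-- what changed: Replaces A's single streaming pass with a per-key counter by a staged group-by algorithm: bucket (index, hit) pairs per source_path, take the first max_per_source of each bucket, then sort the picks by the carried original index to restore input order.
import Mathlib
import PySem

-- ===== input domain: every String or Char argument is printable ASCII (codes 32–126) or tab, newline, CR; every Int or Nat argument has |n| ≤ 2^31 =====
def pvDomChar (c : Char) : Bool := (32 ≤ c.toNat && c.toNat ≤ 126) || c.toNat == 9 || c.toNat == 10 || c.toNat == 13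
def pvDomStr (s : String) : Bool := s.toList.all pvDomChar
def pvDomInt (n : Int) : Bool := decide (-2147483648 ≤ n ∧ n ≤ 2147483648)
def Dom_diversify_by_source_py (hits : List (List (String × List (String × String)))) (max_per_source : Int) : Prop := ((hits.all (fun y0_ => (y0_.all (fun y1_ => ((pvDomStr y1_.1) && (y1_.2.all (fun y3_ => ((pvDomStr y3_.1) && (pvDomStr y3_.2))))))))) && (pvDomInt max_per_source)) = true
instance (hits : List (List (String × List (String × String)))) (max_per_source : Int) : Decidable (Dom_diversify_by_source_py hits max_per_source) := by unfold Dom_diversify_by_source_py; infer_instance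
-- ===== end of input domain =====

-- B replaces A's single streaming pass (mutable per-key counter) by a staged
-- group-by algorithm: bucket (index, hit) pairs per source_path, take each
-- bucket's first max_per_source entries, and sort the picks by the carried
-- original index to restore input order (alternative decomposition, same value).

abbrev PVHit := List (String × List (String × String))

-- ===== PORT A =====
-- sp = (h.get("metadata") or {}).get("source_path", "")   (shared by both ports)
def pvSourceKey (h : PVHit) : String :=
  PySem.Dict.getD (PySem.Dict.ofList (((PySem.Dict.ofList h).get? "metadata").getD [])) "source_path" ""

-- the body of A's for-loop, as a named step function
def pvAStep (m : Int)
    (st : PySem.Dict String Int × List PVHit) (h : PVHit) :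
    PySem.Dict String Int × List PVHit :=
  let sp := pvSourceKey h
  let seen := st.1.insert sp (st.1.getD sp 0 + 1)
  if seen.getD sp 0 ≤ m then (seen, st.2 ++ [h]) else (seen, st.2)

def diversify_by_source_py (hits : List PVHit) (max_per_source : Int) : List PVHit :=
  if max_per_source ≤ 0 then hits
  else (hits.foldl (pvAStep max_per_source) (PySem.Dict.empty, [])).2

-- ===== PORT B =====
def diversify_by_source_py_alt (hits : List PVHit) (max_per_source : Int) : List PVHit :=
  if max_per_source ≤ 0 then hits
  else
    -- buckets.setdefault(sp, []).append((i, h))  ==  modify sp [] (· ++ [(i, h)])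
    let buckets : PySem.Dict String (List (Int × PVHit)) :=
      (PySem.List.enumerate hits).foldl
        (fun d p => d.modify (pvSourceKey p.2) [] (fun l => l ++ [p])) PySem.Dict.empty
    -- for items in buckets.values(): picked.extend(items[:max_per_source])
    let picked :=
      buckets.values.foldl (fun acc l => acc ++ PySem.List.slice l none (some max_per_source)) []
    -- picked.sort(key=lambda p: p[0]); return [h for _, h in picked]
    (PySem.List.sorted picked (fun p => p.1) false).map (fun p => p.2)

-- ===== PRECONDITION & SPEC =====
def Spec_diversify_by_source_py (hits : List (List (String × List (String × String)))) (max_per_source : Int) (out : List (List (String × List (String × String)))) : Prop := out = diversify_by_source_py_alt hits max_per_source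
instance (hits : List (List (String × List (String × String)))) (max_per_source : Int) (out : List (List (String × List (String × String)))) : Decidable (Spec_diversify_by_source_py hits max_per_source out) := by unfold Spec_diversify_by_source_py; infer_instance

-- ===== CLAIM (what is proved, stated in full; the proofs are below) =====
def Claim_equal_diversify_by_source_py : Prop := ∀ (hits : List (List (String × List (String × String)))) (max_per_source : Int), Dom_diversify_by_source_py hits max_per_source → Spec_diversify_by_source_py hits max_per_source (diversify_by_source_py hits max_per_source)

-- ===== LEMMAS AND PROOFS =====

-- Common ground: keep an element iff its key occurred < m times before it.
def pvSel (m : Int) (prev : List String) : List PVHit → List PVHit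
  | [] => []
  | h :: t =>
    if ((prev.count (pvSourceKey h) : Int)) < m then h :: pvSel m (prev ++ [pvSourceKey h]) t
    else pvSel m (prev ++ [pvSourceKey h]) t

-- same selection on (index, hit) pairs (the index is ignored by the test)
def pvSelP (m : Int) (prev : List String) : List (Int × PVHit) → List (Int × PVHit)
  | [] => []
  | p :: t =>
    if ((prev.count (pvSourceKey p.2) : Int)) < m then p :: pvSelP m (prev ++ [pvSourceKey p.2]) t
    else pvSelP m (prev ++ [pvSourceKey p.2]) t

lemma pvA_loop (m : Int) :
    ∀ (l : List PVHit) (d : PySem.Dict String Int) (acc : List PVHit) (prev : List String),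
    (∀ s, d.getD s 0 = (prev.count s : Int)) →
    (l.foldl (pvAStep m) (d, acc)).2 = acc ++ pvSel m prev l := by
  intro l
  induction l with
  | nil => intro d acc prev _; simp [pvSel]
  | cons h t ih =>
    intro d acc prev hinv
    have hins : ∀ s, (d.insert (pvSourceKey h) (d.getD (pvSourceKey h) 0 + 1)).getD s 0
        = ((prev ++ [pvSourceKey h]).count s : Int) := by
      intro s
      rw [PySem.Dict.getD_insert]
      by_cases hs : s = pvSourceKey h
      · simp [hs, hinv, List.count_append]
      · simp [hs, hinv, List.count_append, Ne.symm hs]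
    have hstep : pvAStep m (d, acc) h
        = (d.insert (pvSourceKey h) (d.getD (pvSourceKey h) 0 + 1),
           if ((prev.count (pvSourceKey h) : Int)) < m then acc ++ [h] else acc) := by
      simp only [pvAStep, PySem.Dict.getD_insert_self, hinv (pvSourceKey h)]
      by_cases hc : ((prev.count (pvSourceKey h) : Int)) < m
      · have h1 : (prev.count (pvSourceKey h) : Int) + 1 ≤ m := by omega
        simp [h1, hc]
      · have h1 : ¬ ((prev.count (pvSourceKey h) : Int) + 1 ≤ m) := by omega
        simp [h1, hc]
    rw [List.foldl_cons, hstep]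
    by_cases hc : ((prev.count (pvSourceKey h) : Int)) < m
    · simp only [hc, if_true, pvSel]
      rw [ih _ _ _ hins]
      simp
    · simp only [hc, if_false, pvSel]
      rw [ih _ _ _ hins]

-- dropping the carried indices turns pvSelP on enumerate into pvSel
lemma pvSelP_enumerate_map_snd (m : Int) :
    ∀ (l : List PVHit) (s : Int) (prev : List String),
    (pvSelP m prev (PySem.List.enumerate l s)).map (·.2) = pvSel m prev l := by
  intro l
  induction l with
  | nil => intro s prev; simp [PySem.List.enumerate_nil, pvSelP, pvSel]
  | cons h t ih =>
    intro s prev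
    rw [PySem.List.enumerate_cons]
    by_cases hc : ((prev.count (pvSourceKey h) : Int)) < m
    · simp only [pvSelP, pvSel, hc, if_true, List.map_cons, ih]
    · simp only [pvSelP, pvSel, hc, if_false, ih]

-- pvSelP is a sublist of its input
lemma pvSelP_sublist (m : Int) :
    ∀ (l : List (Int × PVHit)) (prev : List String), (pvSelP m prev l).Sublist l := by
  intro l
  induction l with
  | nil => intro prev; simp [pvSelP]
  | cons p t ih =>
    intro prev
    by_cases hc : ((prev.count (pvSourceKey p.2) : Int)) < m
    · simpa [pvSelP, hc] using (ih (prev ++ [pvSourceKey p.2])).cons₂ p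
    · simpa [pvSelP, hc] using (ih (prev ++ [pvSourceKey p.2])).cons p

-- within one bucket, pvSelP keeps exactly the first (m - prev.count s) elements
lemma pvSelP_filter_key (m : Int) (s : String) :
    ∀ (l : List (Int × PVHit)) (prev : List String),
    (pvSelP m prev l).filter (fun p => pvSourceKey p.2 == s)
      = (l.filter (fun p => pvSourceKey p.2 == s)).take (m - prev.count s).toNat := by
  intro l
  induction l with
  | nil => intro prev; simp [pvSelP]
  | cons p t ih =>
    intro prev
    by_cases hk : pvSourceKey p.2 = s
    · subst hk
      have hcnt : (prev ++ [pvSourceKey p.2]).count (pvSourceKey p.2)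
          = prev.count (pvSourceKey p.2) + 1 := by simp
      by_cases hc : ((prev.count (pvSourceKey p.2) : Int)) < m
      · have htn : (m - prev.count (pvSourceKey p.2)).toNat
            = (m - ((prev.count (pvSourceKey p.2) : Int) + 1)).toNat + 1 := by omega
        rw [pvSelP, if_pos hc, List.filter_cons_of_pos (by simp), ih, hcnt,
          List.filter_cons_of_pos (by simp), htn, List.take_succ_cons]
        push_cast
        ring_nf
      · have h0 : (m - (prev.count (pvSourceKey p.2) : Int)).toNat = 0 := by omega
        have h0' : (m - ((prev.count (pvSourceKey p.2) : Int) + 1)).toNat = 0 := by omega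
        rw [pvSelP, if_neg hc, ih, hcnt, h0]
        push_cast
        rw [h0']
        simp
    · have hcnt : (prev ++ [pvSourceKey p.2]).count s = prev.count s := by
        simp [List.count_append, hk]
      have hfk : ¬ (pvSourceKey p.2 == s) = true := by simp [hk]
      by_cases hc : ((prev.count (pvSourceKey p.2) : Int)) < m
      · rw [pvSelP, if_pos hc]
        simp only [List.filter_cons, hfk, Bool.false_eq_true, if_false]
        rw [ih, hcnt]
      · rw [pvSelP, if_neg hc, ih, hcnt]
        simp only [List.filter_cons, hfk, Bool.false_eq_true, if_false]

-- any list is a permutation of the concatenation of its per-key filters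
lemma pvPerm_flatten_filter {α : Type} (key : α → String) :
    ∀ (ks : List String) (l : List α), ks.Nodup → (∀ x ∈ l, key x ∈ ks) →
    ((ks.map (fun s => l.filter (fun x => key x == s))).flatten).Perm l := by
  intro ks
  induction ks with
  | nil =>
    intro l _ hall
    have hl : l = [] := List.eq_nil_iff_forall_not_mem.2 (fun x hx => by simpa using hall x hx)
    simp [hl]
  | cons s ks ih =>
    intro l hnd hall
    have hs : s ∉ ks := (List.nodup_cons.1 hnd).1
    have hnd' : ks.Nodup := (List.nodup_cons.1 hnd).2
    have hsplit : ∀ s' ∈ ks, l.filter (fun x => key x == s')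
        = (l.filter (fun x => !(key x == s))).filter (fun x => key x == s') := by
      intro s' hs'
      have hne : s' ≠ s := fun he => hs (he ▸ hs')
      rw [List.filter_filter]
      apply List.filter_congr
      intro x _
      by_cases h : key x = s'
      · simp [h, hne]
      · simp [h]
    have hrec : ((ks.map (fun s' => (l.filter (fun x => !(key x == s))).filter
        (fun x => key x == s'))).flatten).Perm (l.filter (fun x => !(key x == s))) := by
      apply ih _ hnd'
      intro x hx
      have h1 := List.of_mem_filter hx
      have h2 := hall x (List.mem_of_mem_filter hx)
      simp only [Bool.not_eq_eq_eq_not, Bool.not_true, beq_eq_false_iff_ne, ne_eq] at h1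
      rcases List.mem_cons.1 h2 with h | h
      · exact absurd h h1
      · exact h
    have h1 : ((s :: ks).map (fun s' => l.filter (fun x => key x == s'))).flatten
        = l.filter (fun x => key x == s)
          ++ ((ks.map (fun s' => (l.filter (fun x => !(key x == s))).filter
              (fun x => key x == s'))).flatten) := by
      rw [List.map_cons, List.flatten_cons, List.map_congr_left hsplit]
    rw [h1]
    exact (List.Perm.append_left _ hrec).trans (List.filter_append_perm _ l)

-- ===== VERDICT (by name: the statement is the Claim_ definition above) =====
theorem diversify_by_source_py_spec : Claim_equal_diversify_by_source_py := by
  intro hits m _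
  unfold Spec_diversify_by_source_py diversify_by_source_py diversify_by_source_py_alt
  by_cases hm : m ≤ 0
  · simp [hm]
  · simp only [hm, if_false]
    have hA := pvA_loop m hits PySem.Dict.empty [] [] (by intro s; simp)
    simp only [List.nil_append] at hA
    rw [hA]
    -- the B side
    set E := PySem.List.enumerate hits 0 with hE
    set key : Int × PVHit → String := fun p => pvSourceKey p.2 with hkey
    set buckets := E.foldl (fun d p => d.modify (pvSourceKey p.2) [] (fun l => l ++ [p]))
      (PySem.Dict.empty : PySem.Dict String (List (Int × PVHit))) with hbk
    set G := pvSelP m [] E with hG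
    -- bucket contents
    have hfold : buckets = (E.map (fun p => (key p, p))).foldl
        (fun d q => d.modify q.1 [] (fun l => l ++ [q.2])) PySem.Dict.empty := by
      rw [List.foldl_map]
    have hgetD : ∀ s, buckets.getD s [] = E.filter (fun p => key p == s) := by
      intro s
      rw [hfold, PySem.Dict.getD_foldl_modify_append]
      simp [List.filter_map, Function.comp_def]
    have hndk : buckets.keys.Nodup := by
      rw [hbk]
      exact PySem.Dict.nodup_keys_foldl_modify_key E (fun p => pvSourceKey p.2) []
        (fun _ p l => l ++ [p]) PySem.Dict.empty (by simp [PySem.Dict.empty])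
    have hkeys : buckets.keys = PySem.Set.ofList (E.map key) := by
      rw [hbk]
      rw [PySem.Dict.keys_foldl_modify_key E (fun p => pvSourceKey p.2) []
        (fun _ p l => l ++ [p]) PySem.Dict.empty]
      simp [PySem.Dict.empty, PySem.Set.update_nil_left, hkey]
    have hvals : buckets.values = buckets.keys.map (fun s => buckets.getD s []) :=
      PySem.Dict.values_eq_map_keys buckets hndk []
    set ks := PySem.Set.ofList (E.map key) with hks
    -- picked, as flatten of per-key slices
    have hpicked : buckets.values.foldl
        (fun acc l => acc ++ PySem.List.slice l none (some m)) []
        = (ks.map (fun s => G.filter (fun p => key p == s))).flatten := by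
      rw [PySem.List.foldl_append_eq_flatMap, List.nil_append, hvals, hkeys]
      rw [List.flatMap_def]
      congr 1
      rw [List.map_map]
      apply List.map_congr_left
      intro s _
      have hsl : PySem.List.slice (buckets.getD s []) none (some m)
          = (buckets.getD s []).take m.toNat := PySem.List.slice_to _ (by omega)
      rw [Function.comp_apply, hsl, hgetD s, hG]
      have := pvSelP_filter_key m s E []
      simp only [List.count_nil, Nat.cast_zero, sub_zero] at this
      rw [this]
    -- G is a strictly index-increasing selection from E
    have hpw : G.Pairwise (fun a b => a.1 < b.1) := by
      have hE' : E.Pairwise (fun a b => a.1 < b.1) := by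
        rw [← List.pairwise_map (f := fun p : Int × PVHit => p.1)]
        rw [hE, PySem.List.map_fst_enumerate]
        exact PySem.List.pairwise_lt_pyRange_one 0 _
      exact hE'.sublist (pvSelP_sublist m E [])
    -- and a permutation of the flattened buckets
    have hperm : G.Perm ((ks.map (fun s => G.filter (fun p => key p == s))).flatten) := by
      refine (pvPerm_flatten_filter key ks G (PySem.Set.nodup_ofList _) ?_).symm
      intro p hp
      rw [hks, PySem.Set.mem_ofList]
      exact List.mem_map_of_mem ((pvSelP_sublist m E []).subset hp)
    rw [hpicked]
    rw [PySem.List.sorted_eq_of_perm_of_pairwise_lt _ G (fun p => p.1) hperm hpw]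
    rw [hG, hE]
    exact (pvSelP_enumerate_map_snd m hits 0 []).symm
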